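-- pv_equiv track=rewrite | github.com/tomrodinger/ESP32_STM32_programmer | tools/compare_sniffs.py | summarize_offset_ranges
-- ===== SOURCE A (Python) =====
-- def summarize_offset_ranges(offsets: list[int]) -> str:
--     if not offsets:
--         return "(none)"
--     ranges: list[tuple[int, int]] = []
--     start = prev = offsets[0]
--     for x in offsets[1:]:
--         if x == prev + 1:
--             prev = x
--             continue
--         ranges.append((start, prev))
--         start = prev = x
--     ranges.append((start, prev))
--     parts = []
--     for lo, hi in ranges:
--         if lo == hi:
--             parts.append(f"0x{lo:X}")
--         else:
--             parts.append(f"0x{lo:X}..0x{hi:X}")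
--     return ", ".join(parts)
-- ===== SOURCE B (Python) =====
-- def summarize_offset_ranges(offsets: list[int]) -> str:
--     if not offsets:
--         return "(none)"
--     # boundary flags between adjacent elements: True where a new run begins
--     breaks = [x != lo + 1 for lo, x in zip(offsets, offsets[1:])]
--     lows = [x for x, b in zip(offsets, [True] + breaks) if b]
--     highs = [x for x, b in zip(offsets, breaks + [True]) if b]
--     return ", ".join(f"0x{lo:X}" if lo == hi else f"0x{lo:X}..0x{hi:X}"
--                      for lo, hi in zip(lows, highs))
-- ===== Notes on version B (the rewrite author's own statement) =====
-- stated objective: idiomatic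
-- what changed: Replaced A's explicit state-machine loop (start/prev accumulator building a ranges list, then a second formatting loop) by declarative boundary detection: zip adjacent pairs to get break flags, select run lows/highs by comprehension, zip and format them in one join.
import Mathlib
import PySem

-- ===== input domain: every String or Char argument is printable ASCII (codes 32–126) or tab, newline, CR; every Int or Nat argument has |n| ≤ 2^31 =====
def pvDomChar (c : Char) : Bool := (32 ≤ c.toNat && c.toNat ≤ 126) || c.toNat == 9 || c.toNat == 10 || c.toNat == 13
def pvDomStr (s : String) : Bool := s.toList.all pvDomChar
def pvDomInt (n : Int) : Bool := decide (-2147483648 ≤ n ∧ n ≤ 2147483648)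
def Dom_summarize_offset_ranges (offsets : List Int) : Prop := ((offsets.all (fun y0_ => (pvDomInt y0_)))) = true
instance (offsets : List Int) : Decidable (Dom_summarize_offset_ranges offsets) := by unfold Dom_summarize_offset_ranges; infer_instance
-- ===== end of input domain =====

-- B replaces A's start/prev state-machine loop by zip-based boundary detection with comprehensions (idiomatic); same O(n) cost.

-- shared formatting helper: exact port of Python's f"0x{n:X}" for every int
-- (uppercase hex digits of |n|, with '-' after "0x" for negative n, as Python's format emits)
def pvHexChar (d : Nat) : Char := if d < 10 then Char.ofNat (48 + d) else Char.ofNat (55 + d)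

def pvHexAux : Nat → List Char → List Char
  | 0, acc => acc
  | n+1, acc => pvHexAux ((n+1) / 16) (pvHexChar ((n+1) % 16) :: acc)
decreasing_by exact Nat.div_lt_self (Nat.succ_pos n) (by norm_num)

def pvFmtHex (n : Int) : String :=
  "0x" ++ (if n < 0 then "-" else "") ++
    (if n.natAbs = 0 then "0" else String.ofList (pvHexAux n.natAbs []))

def pvFmtRange (p : Int × Int) : String :=
  if p.1 = p.2 then pvFmtHex p.1 else pvFmtHex p.1 ++ ".." ++ pvFmtHex p.2

-- ===== PORT A =====
def summarize_offset_ranges (offsets : List Int) : String :=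
  match offsets with
  | [] => "(none)"
  | x0 :: rest =>
    -- for x in offsets[1:] with state (ranges, start, prev)
    let st := rest.foldl
      (fun (acc : List (Int × Int) × Int × Int) x =>
        if x = acc.2.2 + 1 then (acc.1, acc.2.1, x)
        else (acc.1 ++ [(acc.2.1, acc.2.2)], x, x))
      ([], x0, x0)
    let ranges := st.1 ++ [(st.2.1, st.2.2)]
    let parts := ranges.foldl (fun parts p => parts ++ [pvFmtRange p]) ([] : List String)
    PySem.Str.join ", " parts

-- ===== PORT B =====
def summarize_offset_ranges_alt (offsets : List Int) : String :=
  match offsets with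
  | [] => "(none)"
  | _ :: _ =>
    let breaks := (List.zip offsets (offsets.drop 1)).map (fun p => decide (p.2 ≠ p.1 + 1))
    let lows := ((List.zip offsets (true :: breaks)).filter (fun p => p.2)).map (fun p => p.1)
    let highs := ((List.zip offsets (breaks ++ [true])).filter (fun p => p.2)).map (fun p => p.1)
    PySem.Str.join ", " ((List.zip lows highs).map pvFmtRange)

-- ===== PRECONDITION & SPEC =====
def Spec_summarize_offset_ranges (offsets : List Int) (out : String) : Prop := out = summarize_offset_ranges_alt offsets
instance (offsets : List Int) (out : String) : Decidable (Spec_summarize_offset_ranges offsets out) := by unfold Spec_summarize_offset_ranges; infer_instance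

-- ===== CLAIM (what is proved, stated in full; the proofs are below) =====
def Claim_equal_summarize_offset_ranges : Prop := ∀ (offsets : List Int), Dom_summarize_offset_ranges offsets → Spec_summarize_offset_ranges offsets (summarize_offset_ranges offsets)

-- ===== LEMMAS AND PROOFS =====

-- canonical run decomposition shared by both proofs
def pvRuns (s p : Int) : List Int → List (Int × Int)
  | [] => [(s, p)]
  | y :: r => if y = p + 1 then pvRuns s y r else (s, p) :: pvRuns y y r

def pvStarts (p : Int) : List Int → List Int
  | [] => []
  | y :: r => if y = p + 1 then pvStarts y r else y :: pvStarts y r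

def pvEnds (p : Int) : List Int → List Int
  | [] => [p]
  | y :: r => if y = p + 1 then pvEnds y r else p :: pvEnds y r

lemma pvRuns_fst (rest : List Int) : ∀ s p, (pvRuns s p rest).map Prod.fst = s :: pvStarts p rest := by
  induction rest with
  | nil => intro s p; simp [pvRuns, pvStarts]
  | cons y r ih =>
    intro s p
    simp only [pvRuns, pvStarts]
    split_ifs with h
    · exact ih s y
    · simp [ih y y]

lemma pvRuns_snd (rest : List Int) : ∀ s p, (pvRuns s p rest).map Prod.snd = pvEnds p rest := by
  induction rest with
  | nil => intro s p; simp [pvRuns, pvEnds]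
  | cons y r ih =>
    intro s p
    simp only [pvRuns, pvEnds]
    split_ifs with h
    · exact ih s y
    · simp [ih y y]

-- A's first loop computes pvRuns
lemma pvFoldA (rest : List Int) : ∀ (r : List (Int × Int)) (s p : Int),
    (let st := rest.foldl
      (fun (acc : List (Int × Int) × Int × Int) x =>
        if x = acc.2.2 + 1 then (acc.1, acc.2.1, x)
        else (acc.1 ++ [(acc.2.1, acc.2.2)], x, x)) (r, s, p)
     st.1 ++ [(st.2.1, st.2.2)]) = r ++ pvRuns s p rest := by
  induction rest with
  | nil => intro r s p; simp [pvRuns]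
  | cons y t ih =>
    intro r s p
    simp only [List.foldl_cons, pvRuns]
    split_ifs with h
    · exact ih r s y
    · rw [ih (r ++ [(s, p)]) y y]
      simp

-- B's selection comprehensions compute pvStarts / pvEnds
def pvBreaks (l : List Int) : List Bool :=
  (List.zip l (l.drop 1)).map (fun p => decide (p.2 ≠ p.1 + 1))

def pvSel (l : List Int) (bs : List Bool) : List Int :=
  ((List.zip l bs).filter (fun p => p.2)).map (fun p => p.1)

lemma pvBreaks_cons (p y : Int) (r : List Int) :
    pvBreaks (p :: y :: r) = decide (y ≠ p + 1) :: pvBreaks (y :: r) := by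
  simp [pvBreaks]

lemma pvSel_lows (rest : List Int) : ∀ p : Int,
    pvSel (p :: rest) (true :: pvBreaks (p :: rest)) = p :: pvStarts p rest := by
  induction rest with
  | nil => intro p; simp [pvSel, pvBreaks, pvStarts]
  | cons y r ih =>
    intro p
    rw [pvBreaks_cons]
    have hIH := ih y
    simp only [pvSel, List.zip_cons_cons, List.filter_cons] at hIH
    by_cases h : y = p + 1
    · have hb : decide (y ≠ p + 1) = false := by simp [h]
      simp only [pvStarts, if_pos h]
      simp only [pvSel, List.zip_cons_cons, List.filter_cons, hb]
      simpa using hIH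
    · have hb : decide (y ≠ p + 1) = true := by simp [h]
      simp only [pvStarts, if_neg h]
      simp only [pvSel, List.zip_cons_cons, List.filter_cons, hb]
      simpa using hIH
  
lemma pvSel_highs (rest : List Int) : ∀ p : Int,
    pvSel (p :: rest) (pvBreaks (p :: rest) ++ [true]) = pvEnds p rest := by
  induction rest with
  | nil => intro p; simp [pvSel, pvBreaks, pvEnds]
  | cons y r ih =>
    intro p
    rw [pvBreaks_cons]
    have hIH := ih y
    simp only [pvSel] at hIH
    by_cases h : y = p + 1
    · have hb : decide (y ≠ p + 1) = false := by simp [h]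
      simp only [pvEnds, if_pos h]
      simp only [pvSel, List.cons_append, List.zip_cons_cons, List.filter_cons, hb]
      simpa using hIH
    · have hb : decide (y ≠ p + 1) = true := by simp [h]
      simp only [pvEnds, if_neg h]
      simp only [pvSel, List.cons_append, List.zip_cons_cons, List.filter_cons, hb]
      simpa using hIH

-- ===== VERDICT (by name: the statement is the Claim_ definition above) =====
theorem summarize_offset_ranges_spec : Claim_equal_summarize_offset_ranges := by
  intro offsets _
  unfold Spec_summarize_offset_ranges summarize_offset_ranges summarize_offset_ranges_alt
  match offsets with
  | [] => rfl
  | x0 :: rest =>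
    simp only
    rw [PySem.List.foldl_append_singleton_eq_map]
    rw [pvFoldA rest [] x0 x0]
    have hlow : ((List.zip (x0 :: rest) (true :: pvBreaks (x0 :: rest))).filter
        (fun p => p.2)).map (fun p => p.1) = (pvRuns x0 x0 rest).map Prod.fst := by
      rw [pvRuns_fst]
      exact pvSel_lows rest x0
    have hhigh : ((List.zip (x0 :: rest) (pvBreaks (x0 :: rest) ++ [true])).filter
        (fun p => p.2)).map (fun p => p.1) = (pvRuns x0 x0 rest).map Prod.snd := by
      rw [pvRuns_snd]
      exact pvSel_highs rest x0
    simp only [show ((x0 :: rest).zip ((x0 :: rest).drop 1)).map (fun p => decide (p.2 ≠ p.1 + 1))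
        = pvBreaks (x0 :: rest) from rfl]
    rw [hlow, hhigh, List.zip_map']
    simp
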